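-- pv_equiv track=rewrite | github.com/lee-won-suk/algo | 분할정복/17829 222-풀링 정답.py | search
-- ===== SOURCE A (Python) =====
-- def Find(x,y,temp):
--     return sorted ([temp[x][y],temp[x][y+1],temp[x+1][y],temp[x+1][y+1]])[2]
--
-- def search(arr,n):
--     #1개 남으면 정답 출력
--     if n==1:
--         return arr[0][0]
--     #풀링한번 돌고 난 값들 저장할 배열
--     new_arr=[ [] for _ in range(n//2)]
--     for i in range(0,n,2): # 행의 각 시작점들
--         for j in range(0,n,2): # 열의 각 시작점
--             new_arr[i//2].append(Find(i,j,arr))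
--     return search(new_arr,n//2)
-- ===== SOURCE B (Python) =====
-- def Find(x, y, temp):
--     return sorted([temp[x][y], temp[x][y + 1], temp[x + 1][y], temp[x + 1][y + 1]])[2]
--
-- def search(arr, n):
--     # iterative pooling: rebuild the grid level by level with nested
--     # comprehensions instead of recursing with a preallocated/appended array
--     while n > 1:
--         arr = [[Find(i, j, arr) for j in range(0, n, 2)] for i in range(0, n, 2)]
--         n //= 2
--     return arr[0][0]
-- ===== Notes on version B (the rewrite author's own statement) =====
-- stated objective: alternative
-- what changed: Replaces the recursive search with a while loop that threads (arr, n) through iterations, and builds each pooled level directly with nested list comprehensions instead of preallocating n//2 empty rows and appending into them by computed index.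
import Mathlib
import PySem

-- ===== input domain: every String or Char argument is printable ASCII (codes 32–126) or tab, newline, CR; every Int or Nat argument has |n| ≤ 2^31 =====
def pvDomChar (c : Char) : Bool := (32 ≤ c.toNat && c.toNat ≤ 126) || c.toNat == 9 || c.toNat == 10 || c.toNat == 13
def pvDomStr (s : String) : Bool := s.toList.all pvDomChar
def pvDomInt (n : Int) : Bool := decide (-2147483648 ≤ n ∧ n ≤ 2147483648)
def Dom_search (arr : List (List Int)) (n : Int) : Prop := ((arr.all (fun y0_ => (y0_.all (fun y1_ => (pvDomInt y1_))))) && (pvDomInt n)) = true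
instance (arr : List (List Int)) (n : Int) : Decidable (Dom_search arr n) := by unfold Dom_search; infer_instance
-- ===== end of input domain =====

-- B replaces A's recursion with an iterative level-by-level loop building each pooled
-- level via nested comprehensions instead of preallocating rows and appending by index.


-- ===== PORT A =====
-- Find(x,y,temp): indexing is exact under Pre_search (all indices in range there)
def FindA (x y : Int) (temp : List (List Int)) : Int :=
  let r0 := PySem.List.pyGetD temp x ([] : List Int)
  let r1 := PySem.List.pyGetD temp (x + 1) ([] : List Int)
  PySem.List.pyGetD
    (PySem.List.sorted [PySem.List.pyGetD r0 y 0, PySem.List.pyGetD r0 (y + 1) 0,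
                        PySem.List.pyGetD r1 y 0, PySem.List.pyGetD r1 (y + 1) 0]
      (fun v => v) false) 2 0

def search (arr : List (List Int)) (n : Int) : Int :=
  if _h1 : n = 1 then
    PySem.List.pyGetD (PySem.List.pyGetD arr 0 ([] : List Int)) 0 0
  else if _h2 : n ≤ 0 then
    -- totality guard only: Python A never terminates for n ≤ 0 (outside Pre_search)
    0
  else
    -- new_arr = [ [] for _ in range(n//2) ]; new_arr[i//2].append(Find(i,j,arr))
    -- (i//2 is nonnegative here, so the Nat index .toNat is exact)
    let new0 : List (List Int) := (List.range (PySem.Int.floordiv n 2).toNat).map (fun _ => ([] : List Int))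
    let new_arr : List (List Int) :=
      (PySem.List.pyRange 0 n 2).foldl (fun acc i =>
        (PySem.List.pyRange 0 n 2).foldl (fun acc2 j =>
          acc2.modify (PySem.Int.floordiv i 2).toNat (fun row => row ++ [FindA i j arr])) acc) new0
    search new_arr (PySem.Int.floordiv n 2)
termination_by n.toNat
decreasing_by
  rw [PySem.Int.floordiv_eq_ediv_of_pos (by omega : (0:Int) < 2)]
  omega

-- ===== PORT B =====
def FindB (x y : Int) (temp : List (List Int)) : Int :=
  let r0 := PySem.List.pyGetD temp x ([] : List Int)
  let r1 := PySem.List.pyGetD temp (x + 1) ([] : List Int)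
  PySem.List.pyGetD
    (PySem.List.sorted [PySem.List.pyGetD r0 y 0, PySem.List.pyGetD r0 (y + 1) 0,
                        PySem.List.pyGetD r1 y 0, PySem.List.pyGetD r1 (y + 1) 0]
      (fun v => v) false) 2 0

-- while n > 1: arr = [[Find(i,j,arr) for j in range(0,n,2)] for i in range(0,n,2)]; n //= 2
def search_alt (arr : List (List Int)) (n : Int) : Int :=
  if _h : 1 < n then
    search_alt
      ((PySem.List.pyRange 0 n 2).map (fun i =>
        (PySem.List.pyRange 0 n 2).map (fun j => FindB i j arr)))
      (PySem.Int.floordiv n 2)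
  else
    PySem.List.pyGetD (PySem.List.pyGetD arr 0 ([] : List Int)) 0 0
termination_by n.toNat
decreasing_by
  rw [PySem.Int.floordiv_eq_ediv_of_pos (by omega : (0:Int) < 2)]
  omega

-- ===== PRECONDITION & SPEC =====
-- Python A raises IndexError unless n is a power of two and arr offers at least n rows
-- of at least n entries each (and recurses forever for n ≤ 0). The bound k < 32 on the
-- exponent is forced by Dom_search (n ≤ 2^31), so it excludes nothing inside Dom.
def Pre_search (arr : List (List Int)) (n : Int) : Prop :=
  (∃ k : Nat, k < 32 ∧ n = 2 ^ k) ∧ n ≤ (arr.length : Int) ∧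
    ∀ row ∈ arr.take n.toNat, n ≤ (row.length : Int)
instance (arr : List (List Int)) (n : Int) : Decidable (Pre_search arr n) := by
  unfold Pre_search; infer_instance
def pvWitness_search : List (List Int) × Int := ([[1, 2], [3, 4]], 2)
def Spec_search (arr : List (List Int)) (n : Int) (out : Int) : Prop := out = search_alt arr n
instance (arr : List (List Int)) (n : Int) (out : Int) : Decidable (Spec_search arr n out) := by unfold Spec_search; infer_instance

-- ===== CLAIM (what is proved, stated in full; the proofs are below) =====
def Claim_equal_search : Prop := ∀ (arr : List (List Int)) (n : Int), Dom_search arr n → Pre_search arr n → Spec_search arr n (search arr n)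

-- ===== LEMMAS AND PROOFS =====

theorem find_eq : FindB = FindA := rfl

theorem modify_append_cons {α : Type} (pre : List α) (x : α) (l : List α) (f : α → α) :
    (pre ++ x :: l).modify pre.length f = pre ++ f x :: l := by
  induction pre with
  | nil => simp [List.modify_cons]
  | cons a p ih => simp [ih]

theorem inner_fold (js : List Int) (f : Int → Int) (t : Nat) (acc : List (List Int)) :
    js.foldl (fun acc2 j => acc2.modify t (fun row => row ++ [f j])) acc
      = acc.modify t (fun row => row ++ js.map f) := by
  induction js generalizing acc with
  | nil =>
      simp only [List.foldl_nil, List.map_nil, List.append_nil]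
      exact (List.modify_id t acc).symm
  | cons j js ih =>
      rw [List.foldl_cons, ih, List.modify_modify_eq]
      simp [Function.comp_def]

theorem outer_fold (row : Nat → List Int) :
    ∀ (t s : Nat) (pre : List (List Int)), pre.length = s →
      (List.range' s t).foldl (fun acc k => acc.modify k (fun r => r ++ row k))
          (pre ++ List.replicate t ([] : List Int))
        = pre ++ (List.range' s t).map row := by
  intro t
  induction t with
  | zero => intro s pre _; simp
  | succ t ih =>
      intro s pre hpre
      rw [List.range'_succ, List.replicate_succ, List.foldl_cons, List.map_cons]
      have h1 : (pre ++ ([] : List Int) :: List.replicate t ([] : List Int)).modify s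
          (fun r => r ++ row s) = pre ++ row s :: List.replicate t ([] : List Int) := by
        rw [← hpre, modify_append_cons]
        simp
      rw [h1]
      have h2 : pre ++ row s :: List.replicate t ([] : List Int)
          = (pre ++ [row s]) ++ List.replicate t ([] : List Int) := by simp
      rw [h2, ih (s + 1) (pre ++ [row s]) (by simp [hpre])]
      simp

theorem fd2 (k : Nat) : (PySem.Int.floordiv (2 * (k : Int)) 2).toNat = k := by
  rw [PySem.Int.floordiv_eq_ediv_of_pos (by omega : (0:Int) < 2)]
  omega

theorem pyRange_two (m : Nat) :
    PySem.List.pyRange 0 (2 * (m : Int)) 2 = (List.range m).map (fun k : Nat => 2 * (k : Int)) := by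
  rw [PySem.List.pyRange_of_pos 0 (2 * (m : Int)) (by omega : (0:Int) < 2)]
  rcases Nat.eq_zero_or_pos m with hm | hm
  · subst hm; simp
  · have : (if (0:Int) < 2 * (m : Int) then ((2 * (m : Int) - 0 + 2 - 1) / 2).toNat else 0) = m := by
      rw [if_pos (by omega)]
      omega
    rw [this]
    simp only [zero_add]

theorem outer_fold_range (row : Nat → List Int) (m : Nat) :
    (List.range m).foldl (fun acc k => acc.modify k (fun r => r ++ row k))
        (List.replicate m ([] : List Int))
      = (List.range m).map row := by
  rw [List.range_eq_range']
  simpa using outer_fold row m 0 [] rfl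

theorem newarr_eq (arr : List (List Int)) (m : Nat) :
    ((PySem.List.pyRange 0 (2 * (m : Int)) 2).foldl (fun acc i =>
        (PySem.List.pyRange 0 (2 * (m : Int)) 2).foldl (fun acc2 j =>
          acc2.modify (PySem.Int.floordiv i 2).toNat (fun row => row ++ [FindA i j arr])) acc)
      ((List.range m).map (fun _ => ([] : List Int))))
      = (PySem.List.pyRange 0 (2 * (m : Int)) 2).map (fun i =>
          (PySem.List.pyRange 0 (2 * (m : Int)) 2).map (fun j => FindB i j arr)) := by
  rw [find_eq]
  rw [pyRange_two m, List.foldl_map, List.map_map]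
  simp only [fd2, inner_fold, Function.comp_def]
  rw [show (List.range m).map (fun _ => ([] : List Int)) = List.replicate m ([] : List Int) from by
        simp [List.map_const']]
  exact outer_fold_range
    (fun k : Nat => ((List.range m).map (fun j : Nat => 2 * (j : Int))).map
      (fun j => FindA (2 * (k : Int)) j arr)) m

theorem fdM (M : Int) : PySem.Int.floordiv (2 * M) 2 = M := by
  rw [PySem.Int.floordiv_eq_ediv_of_pos (by omega : (0:Int) < 2)]
  exact Int.mul_ediv_cancel_left _ (by omega)

theorem main_eq (k : Nat) : ∀ arr : List (List Int), search arr (2 ^ k) = search_alt arr (2 ^ k) := by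
  induction k with
  | zero =>
      intro arr
      rw [search, search_alt]
      norm_num
  | succ k ih =>
      intro arr
      have hn : ((2:Int) ^ (k + 1)) = 2 * (((2 ^ k : Nat) : Int)) := by push_cast; ring
      have hMpos : (0:Int) < ((2 ^ k : Nat) : Int) := by positivity
      rw [search, search_alt, hn]
      rw [dif_neg (by nlinarith : ¬ ((2:Int) * ((2 ^ k : Nat) : Int) = 1)),
          dif_neg (by nlinarith : ¬ ((2:Int) * ((2 ^ k : Nat) : Int) ≤ 0)),
          dif_pos (by nlinarith : (1:Int) < 2 * ((2 ^ k : Nat) : Int))]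
      simp only [fdM, Int.toNat_natCast]
      rw [newarr_eq arr (2 ^ k)]
      push_cast
      exact ih _

-- ===== VERDICT (by name: the statement is the Claim_ definition above) =====
theorem search_spec : Claim_equal_search := by
  intro arr n _hdom hpre
  unfold Spec_search
  obtain ⟨⟨k, _, hk⟩, _, _⟩ := hpre
  subst hk
  exact main_eq k arr
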